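-- pv_equiv track=rewrite | github.com/chj3748/TIL | python/문제풀이/pg_jumpRidge.py | check
-- ===== SOURCE A (Python) =====
-- def check(mid, stones, k):
--     cnt = 0
--     res = -25557000000
--     for v in stones:
--         if v < mid:
--             cnt += 1
--         else:
--             if cnt >= res:
--                 res = cnt
--             cnt = 0
--     else:
--         if cnt >= res:
--             res = cnt
--     return res >= k
-- ===== SOURCE B (Python) =====
-- def check(mid, stones, k):
--     # positions of stones that survive (>= mid) act as separators; the answer
--     # is the largest gap between consecutive separators (with virtual ones at
--     # the two ends), i.e. the longest run of stones below mid.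
--     seps = [i for i, v in enumerate(stones) if v >= mid]
--     bounds = [-1] + seps + [len(stones)]
--     longest = max(b - a - 1 for a, b in zip(bounds, bounds[1:]))
--     return longest >= k
-- ===== Notes on version B (the rewrite author's own statement) =====
-- stated objective: alternative
-- what changed: Replaces the running-counter-with-reset-and-sentinel loop by a separator-index formulation: collect the indices of stones >= mid, bracket them with virtual separators -1 and len(stones), and take the maximum gap between consecutive separators.
import Mathlib
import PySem

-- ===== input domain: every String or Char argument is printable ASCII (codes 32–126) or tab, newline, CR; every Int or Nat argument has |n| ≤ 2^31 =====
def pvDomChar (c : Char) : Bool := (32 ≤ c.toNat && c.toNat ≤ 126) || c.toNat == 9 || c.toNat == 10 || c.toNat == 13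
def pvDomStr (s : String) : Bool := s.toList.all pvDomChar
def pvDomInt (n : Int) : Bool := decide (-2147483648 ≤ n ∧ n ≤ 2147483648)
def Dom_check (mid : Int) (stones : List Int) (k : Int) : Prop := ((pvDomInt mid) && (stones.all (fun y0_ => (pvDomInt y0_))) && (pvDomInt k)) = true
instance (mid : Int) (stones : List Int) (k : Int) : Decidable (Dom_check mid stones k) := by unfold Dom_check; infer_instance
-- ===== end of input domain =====

-- B replaces A's running-counter-with-reset loop by a separator-index formulation
-- (max gap between consecutive indices of stones >= mid); same O(n) cost, alternative algorithm.

-- ===== PORT A =====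
def checkStep (mid : Int) (st : Int × Int) (v : Int) : Int × Int :=
  if v < mid then (st.1 + 1, st.2)
  else (0, if st.1 ≥ st.2 then st.1 else st.2)

def check (mid : Int) (stones : List Int) (k : Int) : Bool :=
  let st := stones.foldl (checkStep mid) (0, -25557000000)
  let res := if st.1 ≥ st.2 then st.1 else st.2
  decide (res ≥ k)

-- ===== PORT B =====
def check_alt (mid : Int) (stones : List Int) (k : Int) : Bool :=
  let seps : List Int := (PySem.List.enumerate stones).filterMap
      (fun p => if p.2 ≥ mid then some p.1 else none)
  let bounds : List Int := [-1] ++ seps ++ [(stones.length : Int)]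
  let gaps : List Int := (bounds.zip bounds.tail).map (fun p => p.2 - p.1 - 1)
  -- bounds always has ≥ 2 elements, so gaps ≠ [] and Python's max never raises; .getD 0 is unreachable
  let longest : Int := (PySem.List.max? gaps (fun y => y)).getD 0
  decide (longest ≥ k)

-- ===== PRECONDITION & SPEC =====
def Spec_check (mid : Int) (stones : List Int) (k : Int) (out : Bool) : Prop := out = check_alt mid stones k
instance (mid : Int) (stones : List Int) (k : Int) (out : Bool) : Decidable (Spec_check mid stones k out) := by unfold Spec_check; infer_instance

-- ===== CLAIM (what is proved, stated in full; the proofs are below) =====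
def Claim_equal_check : Prop := ∀ (mid : Int) (stones : List Int) (k : Int), Dom_check mid stones k → Spec_check mid stones k (check mid stones k)

-- ===== LEMMAS AND PROOFS =====

-- run decomposition: (length of the first maximal run of stones < mid, lengths of the later runs)
def pvRuns (mid : Int) : List Int → Int × List Int
  | [] => (0, [])
  | v :: xs =>
    let p := pvRuns mid xs
    if v < mid then (p.1 + 1, p.2) else (0, p.1 :: p.2)

def gapsOf (l : List Int) : List Int := (l.zip l.tail).map (fun p => p.2 - p.1 - 1)

def pvSeps (mid : Int) (xs : List Int) (s : Int) : List Int :=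
  (PySem.List.enumerate xs s).filterMap (fun p => if p.2 ≥ mid then some p.1 else none)

theorem gapsOf_cons_cons (a b : Int) (l : List Int) :
    gapsOf (a :: b :: l) = (b - a - 1) :: gapsOf (b :: l) := rfl

theorem foldl_max_max (t : List Int) : ∀ (a b : Int),
    t.foldl max (max a b) = max a (t.foldl max b) := by
  induction t with
  | nil => intro a b; rfl
  | cons x t ih =>
    intro a b
    simp only [List.foldl_cons, max_assoc]
    exact ih a (max b x)

theorem pvRuns_fst_nonneg (mid : Int) (xs : List Int) : 0 ≤ (pvRuns mid xs).1 := by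
  induction xs with
  | nil => simp [pvRuns]
  | cons v xs ih =>
    simp only [pvRuns]
    split <;> (simp; try omega)

theorem foldA_eq (mid : Int) (xs : List Int) : ∀ (c r : Int),
    (let st := xs.foldl (checkStep mid) (c, r);
     if st.1 ≥ st.2 then st.1 else st.2)
    = max r ((pvRuns mid xs).2.foldl max (c + (pvRuns mid xs).1)) := by
  induction xs with
  | nil =>
    intro c r
    simp only [List.foldl_nil, pvRuns, List.foldl_nil]
    rw [max_def]
    split_ifs <;> omega
  | cons v xs ih =>
    intro c r
    simp only [List.foldl_cons, checkStep, pvRuns]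
    by_cases hv : v < mid
    · simp only [if_pos hv]
      have := ih (c + 1) r
      simp only at this
      rw [this]
      have harith : c + 1 + (pvRuns mid xs).1 = c + ((pvRuns mid xs).1 + 1) := by ring
      rw [harith]
    · simp only [if_neg hv]
      have := ih 0 (if c ≥ r then c else r)
      simp only at this
      rw [this]
      have h1 : (if c ≥ r then c else r) = max c r := by rw [max_def]; split_ifs <;> omega
      rw [h1]
      simp only [List.foldl_cons, zero_add, add_zero]
      rw [foldl_max_max, max_assoc, max_left_comm]

theorem seps_cons (mid v : Int) (xs : List Int) (s : Int) :
    pvSeps mid (v :: xs) s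
      = (if v ≥ mid then [s] else []) ++ pvSeps mid xs (s + 1) := by
  simp only [pvSeps, PySem.List.enumerate_cons, List.filterMap_cons]
  by_cases h : v ≥ mid
  · simp [h]
  · simp [h]

theorem gaps_eq (mid : Int) (xs : List Int) : ∀ (s a : Int),
    gapsOf (a :: (pvSeps mid xs s ++ [s + xs.length]))
      = ((s - 1 - a) + (pvRuns mid xs).1) :: (pvRuns mid xs).2 := by
  induction xs with
  | nil =>
    intro s a
    simp [pvSeps, PySem.List.enumerate, gapsOf, pvRuns]
    ring
  | cons v xs ih =>
    intro s a
    rw [seps_cons]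
    have hlen : s + ((v :: xs).length : Int) = (s + 1) + (xs.length : Int) := by
      simp; ring
    rw [hlen]
    by_cases hv : v < mid
    · have hge : ¬ (v ≥ mid) := by omega
      rw [if_neg hge]
      simp only [List.nil_append]
      rw [ih (s + 1) a]
      simp only [pvRuns, if_pos hv]
      congr 1
      ring
    · have hge : v ≥ mid := by omega
      rw [if_pos hge]
      simp only [List.cons_append, List.nil_append]
      rw [gapsOf_cons_cons, ih (s + 1) s]
      simp only [pvRuns, if_neg hv]
      norm_num
      omega

theorem gapsOf_def (l : List Int) :
    (l.zip l.tail).map (fun p => p.2 - p.1 - 1) = gapsOf l := rfl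

theorem check_eq_alt (mid : Int) (stones : List Int) (k : Int) :
    check mid stones k = check_alt mid stones k := by
  unfold check check_alt
  simp only [gapsOf_def]
  have hb : [-1] ++ ((PySem.List.enumerate stones).filterMap
        (fun p => if p.2 ≥ mid then some p.1 else none)) ++ [(stones.length : Int)]
      = (-1) :: (pvSeps mid stones 0 ++ [(0 : Int) + (stones.length : Int)]) := by
    simp [pvSeps]
  simp only [hb, gaps_eq]
  have hh : (0 : Int) - 1 - (-1) + (pvRuns mid stones).1 = (pvRuns mid stones).1 := by ring
  simp only [hh, PySem.List.max?_id_cons, Option.getD_some]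
  have hA := foldA_eq mid stones 0 (-25557000000)
  simp only at hA
  simp only [hA, zero_add]
  have h0 : (0 : Int) ≤ (pvRuns mid stones).1 := pvRuns_fst_nonneg mid stones
  have hle : (pvRuns mid stones).1 ≤ (pvRuns mid stones).2.foldl max (pvRuns mid stones).1 :=
    (PySem.List.le_foldl_max _ _).1
  have hmax : max (-25557000000 : Int) ((pvRuns mid stones).2.foldl max (pvRuns mid stones).1)
      = (pvRuns mid stones).2.foldl max (pvRuns mid stones).1 := max_eq_right (by omega)
  simp only [hmax]

-- ===== VERDICT (by name: the statement is the Claim_ definition above) =====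
theorem check_spec : Claim_equal_check := by
  intro mid stones k _
  exact check_eq_alt mid stones k
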